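-- pv_equiv track=rewrite | github.com/WencaiZheng/Twitter-Analysis-With-Earning-Event | senti_process.py | get_senti
-- ===== SOURCE A (Python) =====
-- def get_senti(rawtxt,pos_dic,neg_dic):
--     txt_list= rawtxt.split(" ")
--     pos_count,neg_count =0,0
--     for i in txt_list:
--         if i in pos_dic:pos_count+=1
--         if i in neg_dic:neg_count+=1
--     # positive
--     if pos_count>neg_count:senti = 1
--     elif pos_count<neg_count:senti = -1
--     else: senti = 0
--     return senti
-- ===== SOURCE B (Python) =====
-- def get_senti(rawtxt, pos_dic, neg_dic):
--     counts = {}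
--     for w in rawtxt.split(" "):
--         counts[w] = counts.get(w, 0) + 1
--     pos_count = sum(c for w, c in counts.items() if w in pos_dic)
--     neg_count = sum(c for w, c in counts.items() if w in neg_dic)
--     if pos_count > neg_count:
--         return 1
--     if pos_count < neg_count:
--         return -1
--     return 0
-- ===== Notes on version B (the rewrite author's own statement) =====
-- stated objective: alternative
-- what changed: B builds a word-frequency table in one pass over the tokens and then sums the counts of dictionary-key hits over the distinct words, instead of A's token-by-token scan with two membership tests per token.
import Mathlib
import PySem

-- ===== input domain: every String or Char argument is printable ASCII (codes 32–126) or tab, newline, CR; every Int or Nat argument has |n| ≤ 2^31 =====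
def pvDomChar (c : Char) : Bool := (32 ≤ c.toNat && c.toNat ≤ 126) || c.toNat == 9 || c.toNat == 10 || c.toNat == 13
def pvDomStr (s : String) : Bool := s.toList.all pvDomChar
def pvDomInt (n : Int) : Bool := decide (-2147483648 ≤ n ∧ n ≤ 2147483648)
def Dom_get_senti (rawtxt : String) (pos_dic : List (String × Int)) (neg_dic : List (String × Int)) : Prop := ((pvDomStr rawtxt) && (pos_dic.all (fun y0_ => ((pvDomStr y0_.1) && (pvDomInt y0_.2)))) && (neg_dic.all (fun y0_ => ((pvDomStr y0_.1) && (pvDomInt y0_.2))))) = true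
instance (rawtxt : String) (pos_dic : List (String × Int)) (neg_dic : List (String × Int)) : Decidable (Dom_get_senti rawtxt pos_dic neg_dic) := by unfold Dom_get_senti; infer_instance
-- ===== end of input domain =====

-- B builds a word-frequency table first and sums counts of dictionary-key hits over distinct words (alternative decomposition; return value proved equal to A's on all inputs).


-- ===== PORT A =====
-- A: one pass over the tokens; 'i in pos_dic' (dict key membership) is a scan of the keys.
-- Tokens are kept as List Char (PySem.Chars.splitOn is the exact rawtxt.split(" ")).
def get_senti (rawtxt : String) (pos_dic : List (String × Int)) (neg_dic : List (String × Int)) : Int :=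
  let txt_list := PySem.Chars.splitOn rawtxt.toList [' ']
  let pn := txt_list.foldl (fun (pn : Int × Int) i =>
      ((if (pos_dic.map (fun kv => kv.1.toList)).contains i then pn.1 + 1 else pn.1),
       (if (neg_dic.map (fun kv => kv.1.toList)).contains i then pn.2 + 1 else pn.2))) ((0 : Int), (0 : Int))
  if pn.1 > pn.2 then 1 else if pn.1 < pn.2 then -1 else 0

-- ===== PORT B =====
-- B: build the frequency table (Counter) first, then sum counts of dictionary hits over distinct words.
def get_senti_alt (rawtxt : String) (pos_dic : List (String × Int)) (neg_dic : List (String × Int)) : Int :=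
  let counts := PySem.Dict.counter (PySem.Chars.splitOn rawtxt.toList [' '])
  let pos_count := ((counts.items.filter (fun wc => (pos_dic.map (fun kv => kv.1.toList)).contains wc.1)).map Prod.snd).sum
  let neg_count := ((counts.items.filter (fun wc => (neg_dic.map (fun kv => kv.1.toList)).contains wc.1)).map Prod.snd).sum
  if pos_count > neg_count then 1 else if pos_count < neg_count then -1 else 0

-- ===== PRECONDITION & SPEC =====
def Spec_get_senti (rawtxt : String) (pos_dic : List (String × Int)) (neg_dic : List (String × Int)) (out : Int) : Prop := out = get_senti_alt rawtxt pos_dic neg_dic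
instance (rawtxt : String) (pos_dic : List (String × Int)) (neg_dic : List (String × Int)) (out : Int) : Decidable (Spec_get_senti rawtxt pos_dic neg_dic out) := by unfold Spec_get_senti; infer_instance

-- ===== CLAIM (what is proved, stated in full; the proofs are below) =====
def Claim_equal_get_senti : Prop := ∀ (rawtxt : String) (pos_dic : List (String × Int)) (neg_dic : List (String × Int)), Dom_get_senti rawtxt pos_dic neg_dic → Spec_get_senti rawtxt pos_dic neg_dic (get_senti rawtxt pos_dic neg_dic)

-- ===== LEMMAS AND PROOFS =====

-- A's paired counting fold computes the two countP's.
theorem pv_foldA (P N : List Char → Bool) (xs : List (List Char)) (p n : Int) :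
    xs.foldl (fun (pn : Int × Int) i =>
      ((if P i then pn.1 + 1 else pn.1), (if N i then pn.2 + 1 else pn.2))) (p, n)
    = (p + (xs.countP P : Int), n + (xs.countP N : Int)) := by
  induction xs generalizing p n with
  | nil => simp
  | cons x xs ih =>
    simp only [List.foldl_cons, List.countP_cons, ih]
    by_cases hP : P x <;> by_cases hN : N x <;>
      simp [hP, hN, Prod.ext_iff] <;> omega

-- one-hot sum over a nodup list containing x
theorem pv_onehot (P : List Char → Bool) (ks : List (List Char)) (hnd : ks.Nodup)
    (x : List Char) (hx : x ∈ ks) :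
    ((ks.filter P).map (fun k => if x = k then (1 : Int) else 0)).sum
      = if P x then (1 : Int) else 0 := by
  induction ks with
  | nil => simp at hx
  | cons k ks ih =>
    simp only [List.nodup_cons] at hnd
    rcases List.mem_cons.mp hx with h | h
    · subst h
      have hz : ((ks.filter P).map (fun k => if x = k then (1 : Int) else 0)).sum = 0 := by
        apply List.sum_eq_zero
        intro y hy
        simp only [List.mem_map] at hy
        obtain ⟨k', hk', rfl⟩ := hy
        have hm : k' ∈ ks := List.mem_of_mem_filter hk'
        have : x ≠ k' := fun he => hnd.1 (he ▸ hm)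
        simp [this]
      by_cases hP : P x <;> simp [hP, hz]
    · have hne : x ≠ k := fun he => hnd.1 (he ▸ h)
      by_cases hP : P k <;> simp [hP, hne, ih hnd.2 h]

-- sum of counts over the distinct keys passing P = countP P
theorem pv_sumcount (P : List Char → Bool) (ks xs : List (List Char)) (hnd : ks.Nodup)
    (hcov : ∀ x ∈ xs, x ∈ ks) :
    ((ks.filter P).map (fun k => (xs.count k : Int))).sum = (xs.countP P : Int) := by
  induction xs with
  | nil => simp
  | cons x xs ih =>
    have hcov' : ∀ y ∈ xs, y ∈ ks := fun y hy => hcov y (List.mem_cons_of_mem _ hy)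
    have hsplit : ((ks.filter P).map (fun k => ((x :: xs).count k : Int))).sum
        = ((ks.filter P).map (fun k => (xs.count k : Int))).sum
          + ((ks.filter P).map (fun k => if x = k then (1 : Int) else 0)).sum := by
      rw [← List.sum_map_add]
      apply congrArg
      apply List.map_congr_left
      intro k _
      by_cases hk : x = k
      · subst hk; rw [List.count_cons_self]; push_cast; simp
      · have h2 : (k == x) = false := by
          simp only [beq_eq_false_iff_ne]; exact fun he => hk he.symm
        simp [hk]
    rw [hsplit, ih hcov', pv_onehot P ks hnd x (hcov x (List.mem_cons_self))]
    simp only [List.countP_cons]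
    by_cases hP : P x
    · simp only [hP, if_true, cond_true]
      push_cast
      ring
    · simp [hP]

-- ===== VERDICT (by name: the statement is the Claim_ definition above) =====
theorem get_senti_spec : Claim_equal_get_senti := by
  intro rawtxt pos_dic neg_dic _
  unfold Spec_get_senti get_senti get_senti_alt
  set xs : List (List Char) := PySem.Chars.splitOn rawtxt.toList [' '] with hxs
  have hnd : (PySem.Dict.counter xs (κ := List Char)).keys.Nodup := PySem.Dict.nodup_keys_counter xs
  have hitems : (PySem.Dict.counter xs (κ := List Char)).items
      = (PySem.Dict.counter xs (κ := List Char)).keys.map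
          (fun k => (k, (PySem.Dict.counter xs (κ := List Char)).getD k 0)) :=
    PySem.Dict.items_eq_map_keys _ hnd 0
  have hB : ∀ (P : List Char → Bool),
      (((PySem.Dict.counter xs (κ := List Char)).items.filter (fun wc => P wc.1)).map Prod.snd).sum
        = (xs.countP P : Int) := by
    intro P
    rw [hitems, PySem.Dict.keys_counter]
    have hcomm : ∀ (ks : List (List Char)) (f : List Char → Int),
        (((ks.map (fun k => (k, f k))).filter (fun wc => P wc.1)).map Prod.snd)
        = (ks.filter P).map f := by
      intro ks f
      induction ks with
      | nil => simp
      | cons k ks ih =>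
        simp only [List.map_cons, List.filter_cons]
        by_cases h : P k <;> simp [h, ih]
    rw [hcomm]
    have heq : ((PySem.Set.ofList xs).filter P).map
          (fun k => (PySem.Dict.counter xs (κ := List Char)).getD k 0)
        = ((PySem.Set.ofList xs).filter P).map (fun k => (xs.count k : Int)) := by
      apply List.map_congr_left
      intro k _
      exact PySem.Dict.getD_counter xs k
    rw [heq]
    exact pv_sumcount P _ xs (by rw [PySem.Dict.keys_counter] at hnd; exact hnd)
      (fun x hx => (PySem.Set.mem_ofList xs x).mpr hx)
  have hBp := hB (fun i => (pos_dic.map (fun kv => kv.1.toList)).contains i)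
  have hBn := hB (fun i => (neg_dic.map (fun kv => kv.1.toList)).contains i)
  simp only [pv_foldA, hBp, hBn]
  have hc : ∀ (l : List (List Char)),
      List.countP l.contains xs = List.countP (fun i => decide (i ∈ l)) xs := by
    intro l
    apply List.countP_congr
    intro y _
    simp [List.contains_eq_mem]
  simp only [hc, zero_add]
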